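-- pv_equiv track=rewrite | github.com/JdJonesTech/Rag-Knowledge-System | jd_jones_rag/src/quotation/analyzer.py | normalize_material_grade
-- ===== SOURCE A (Python) =====
-- VALID_MATERIAL_GRADES = ["Standard", "High Purity", "Food Grade", "Nuclear Grade"]
--
-- MATERIAL_GRADE_ALIASES = {
--     "standard": "Standard",
--     "regular": "Standard",
--     "normal": "Standard",
--     "basic": "Standard",
--     "general": "Standard",
--     "high purity": "High Purity",
--     "high-purity": "High Purity",
--     "highpurity": "High Purity",
--     "hp": "High Purity",
--     "premium": "High Purity",
--     "top notch": "High Purity",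
--     "top-notch": "High Purity",
--     "topnotch": "High Purity",
--     "superior": "High Purity",
--     "ultra": "High Purity",
--     "food grade": "Food Grade",
--     "food-grade": "Food Grade",
--     "foodgrade": "Food Grade",
--     "fda": "Food Grade",
--     "food safe": "Food Grade",
--     "food": "Food Grade",
--     "pharmaceutical": "Food Grade",
--     "nuclear grade": "Nuclear Grade",
--     "nuclear-grade": "Nuclear Grade",
--     "nucleargrade": "Nuclear Grade",
--     "nuclear": "Nuclear Grade",
--     "reactor": "Nuclear Grade",
--     "radiation": "Nuclear Grade",
-- }
--
-- def normalize_material_grade(grade_text: str) -> str: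
--     """Normalize a free-text material grade to one of the 4 valid grades."""
--     if not grade_text:
--         return "Standard"
--
--     text = grade_text.strip().lower()
--
--     # Direct match
--     if text in MATERIAL_GRADE_ALIASES:
--         return MATERIAL_GRADE_ALIASES[text]
--
--     # Check if any alias is contained in the text
--     for alias, grade in sorted(MATERIAL_GRADE_ALIASES.items(), key=lambda x: len(x[0]), reverse=True):
--         if alias in text:
--             return grade
--
--     # Check if any valid grade name is contained
--     for grade in VALID_MATERIAL_GRADES:
--         if grade.lower() in text:
--             return grade
--
--     return "Standard"  # Default
-- ===== SOURCE B (Python) =====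
-- VALID_MATERIAL_GRADES = ["Standard", "High Purity", "Food Grade", "Nuclear Grade"]
--
-- MATERIAL_GRADE_ALIASES = {
--     "standard": "Standard",
--     "regular": "Standard",
--     "normal": "Standard",
--     "basic": "Standard",
--     "general": "Standard",
--     "high purity": "High Purity",
--     "high-purity": "High Purity",
--     "highpurity": "High Purity",
--     "hp": "High Purity",
--     "premium": "High Purity",
--     "top notch": "High Purity",
--     "top-notch": "High Purity",
--     "topnotch": "High Purity",
--     "superior": "High Purity",
--     "ultra": "High Purity",
--     "food grade": "Food Grade",
--     "food-grade": "Food Grade",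
--     "foodgrade": "Food Grade",
--     "fda": "Food Grade",
--     "food safe": "Food Grade",
--     "food": "Food Grade",
--     "pharmaceutical": "Food Grade",
--     "nuclear grade": "Nuclear Grade",
--     "nuclear-grade": "Nuclear Grade",
--     "nucleargrade": "Nuclear Grade",
--     "nuclear": "Nuclear Grade",
--     "reactor": "Nuclear Grade",
--     "radiation": "Nuclear Grade",
-- }
--
-- def normalize_material_grade(grade_text: str) -> str:
--     """Normalize a free-text material grade to one of the 4 valid grades."""
--     text = grade_text.strip().lower()
--     # One pass: keep the longest alias contained in the text
--     # (first in insertion order on ties, matching A's stable reverse sort).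
--     best = None
--     for alias, grade in MATERIAL_GRADE_ALIASES.items():
--         if alias in text and (best is None or len(alias) > best[0]):
--             best = (len(alias), grade)
--     return best[1] if best else "Standard"
-- ===== Notes on version B (the rewrite author's own statement) =====
-- stated objective: simpler
-- what changed: Replaces A's length-sorted rescan of the alias dict, the separate direct-lookup shortcut and the (dead) third loop over grade names by one fold over the alias dict in insertion order that keeps the longest contained alias (first on ties, matching A's stable reverse sort).
import Mathlib
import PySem

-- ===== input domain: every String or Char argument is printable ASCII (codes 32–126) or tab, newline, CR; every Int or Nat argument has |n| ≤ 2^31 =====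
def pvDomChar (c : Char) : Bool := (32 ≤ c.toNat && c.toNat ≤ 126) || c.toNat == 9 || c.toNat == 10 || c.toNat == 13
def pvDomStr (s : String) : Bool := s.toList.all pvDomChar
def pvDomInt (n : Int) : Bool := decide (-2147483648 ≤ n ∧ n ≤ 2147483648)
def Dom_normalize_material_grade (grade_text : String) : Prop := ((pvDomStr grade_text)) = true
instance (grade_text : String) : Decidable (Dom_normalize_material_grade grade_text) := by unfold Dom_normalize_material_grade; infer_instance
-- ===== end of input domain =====

-- B replaces A's sort + three scan loops by one fold over the alias dict keeping the
-- longest contained alias (first on ties), for a simpler single-pass decomposition.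

-- ===== PORT A =====
def pvAliases : PySem.Dict String String := PySem.Dict.ofList [("standard", "Standard"), ("regular", "Standard"), ("normal", "Standard"), ("basic", "Standard"), ("general", "Standard"), ("high purity", "High Purity"), ("high-purity", "High Purity"), ("highpurity", "High Purity"), ("hp", "High Purity"), ("premium", "High Purity"), ("top notch", "High Purity"), ("top-notch", "High Purity"), ("topnotch", "High Purity"), ("superior", "High Purity"), ("ultra", "High Purity"), ("food grade", "Food Grade"), ("food-grade", "Food Grade"), ("foodgrade", "Food Grade"), ("fda", "Food Grade"), ("food safe", "Food Grade"), ("food", "Food Grade"), ("pharmaceutical", "Food Grade"), ("nuclear grade", "Nuclear Grade"), ("nuclear-grade", "Nuclear Grade"), ("nucleargrade", "Nuclear Grade"), ("nuclear", "Nuclear Grade"), ("reactor", "Nuclear Grade"), ("radiation", "Nuclear Grade")]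

def pvValid : List String := ["Standard", "High Purity", "Food Grade", "Nuclear Grade"]

-- the 'for alias, grade in sorted(...)' loop with early return
def pvLoop1 : List (String × String) → String → Option String
  | [], _ => none
  | (a, g) :: rest, t => if PySem.Str.isIn a t then some g else pvLoop1 rest t

-- the 'for grade in VALID_MATERIAL_GRADES' loop, falling through to the default
def pvLoop2 : List String → String → String
  | [], _ => "Standard"
  | g :: rest, t => if PySem.Str.isIn (PySem.Str.lower g) t then g else pvLoop2 rest t

-- body of A after the falsiness guard, on text = grade_text.strip().lower()
def pvMatchA (text : String) : String :=
  match PySem.Dict.get? pvAliases text with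
  | some g => g
  | none =>
    match pvLoop1 (PySem.List.sorted pvAliases.items (fun x => PySem.Str.len x.1) true) text with
    | some g => g
    | none => pvLoop2 pvValid text

def normalize_material_grade (grade_text : String) : String :=
  if grade_text = "" then "Standard"
  else pvMatchA (PySem.Str.lower (PySem.Str.strip grade_text))

-- ===== PORT B =====
-- loop body of Source B: keep (len(alias), grade) of the best match so far
def pvStep (t : String) (best : Option (Int × String)) (p : String × String) : Option (Int × String) :=
  if PySem.Str.isIn p.1 t &&
      (match best with | none => true | some (n, _) => decide (n < PySem.Str.len p.1)) then
    some (PySem.Str.len p.1, p.2)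
  else best

-- body of Source B on text = grade_text.strip().lower(): the single fold and the final default
def pvMatchB (text : String) : String :=
  match pvAliases.items.foldl (pvStep text) none with
  | some (_, g) => g
  | none => "Standard"

def normalize_material_grade_alt (grade_text : String) : String :=
  pvMatchB (PySem.Str.lower (PySem.Str.strip grade_text))

-- ===== PRECONDITION & SPEC =====
def Spec_normalize_material_grade (grade_text : String) (out : String) : Prop := out = normalize_material_grade_alt grade_text
instance (grade_text : String) (out : String) : Decidable (Spec_normalize_material_grade grade_text out) := by unfold Spec_normalize_material_grade; infer_instance

-- ===== CLAIM (what is proved, stated in full; the proofs are below) =====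
def Claim_equal_normalize_material_grade : Prop := ∀ (grade_text : String), Dom_normalize_material_grade grade_text → Spec_normalize_material_grade grade_text (normalize_material_grade grade_text)

-- ===== LEMMAS AND PROOFS =====

-- A's sorted alias list, as a literal (checked by `decide` below)
def pvSLit : List (String × String) := [("pharmaceutical", "Food Grade"), ("nuclear grade", "Nuclear Grade"), ("nuclear-grade", "Nuclear Grade"), ("nucleargrade", "Nuclear Grade"), ("high purity", "High Purity"), ("high-purity", "High Purity"), ("highpurity", "High Purity"), ("food grade", "Food Grade"), ("food-grade", "Food Grade"), ("top notch", "High Purity"), ("top-notch", "High Purity"), ("foodgrade", "Food Grade"), ("food safe", "Food Grade"), ("radiation", "Nuclear Grade"), ("standard", "Standard"), ("topnotch", "High Purity"), ("superior", "High Purity"), ("regular", "Standard"), ("general", "Standard"), ("premium", "High Purity"), ("nuclear", "Nuclear Grade"), ("reactor", "Nuclear Grade"), ("normal", "Standard"), ("basic", "Standard"), ("ultra", "High Purity"), ("food", "Food Grade"), ("fda", "Food Grade"), ("hp", "High Purity")]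

-- 'S is a stable length-descending rearrangement of l': each head is the first
-- element of maximal key length remaining.
inductive pvSS : List (String × String) → List (String × String) → Prop
  | nil : pvSS [] []
  | cons (x : String × String) (u v S' : List (String × String))
      (hu : ∀ y ∈ u, PySem.Str.len y.1 < PySem.Str.len x.1)
      (hv : ∀ y ∈ v, PySem.Str.len y.1 ≤ PySem.Str.len x.1)
      (h : pvSS (u ++ v) S') : pvSS (u ++ x :: v) (x :: S')

def pvSplit (x : String × String) : List (String × String) → Option (List (String × String) × List (String × String))
  | [] => none
  | y :: ys => if y = x then some ([], ys) else (pvSplit x ys).map (fun uv => (y :: uv.1, uv.2))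

def pvChk : List (String × String) → List (String × String) → Bool
  | l, [] => l.isEmpty
  | l, x :: S' =>
    match pvSplit x l with
    | none => false
    | some (u, v) =>
      u.all (fun y => PySem.Str.len y.1 < PySem.Str.len x.1) &&
      v.all (fun y => PySem.Str.len y.1 ≤ PySem.Str.len x.1) && pvChk (u ++ v) S'

theorem pvSplit_eq {x : String × String} : ∀ {l u v : List (String × String)},
    pvSplit x l = some (u, v) → l = u ++ x :: v := by
  intro l
  induction l with
  | nil => intro u v h; simp [pvSplit] at h
  | cons y ys ih =>
    intro u v h
    rw [pvSplit] at h
    by_cases hy : y = x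
    · rw [if_pos hy] at h
      injection h with h
      injection h with h1 h2
      subst h1; subst h2; subst hy; rfl
    · rw [if_neg hy] at h
      rcases hs : pvSplit x ys with _ | ⟨u', v'⟩ <;> rw [hs] at h
      · simp at h
      · simp only [Option.map_some] at h
        injection h with h
        injection h with h1 h2
        subst h1; subst h2
        simp [ih hs]

theorem pvChk_sound : ∀ (S l : List (String × String)), pvChk l S = true → pvSS l S := by
  intro S
  induction S with
  | nil =>
    intro l h
    simp only [pvChk, List.isEmpty_iff] at h
    subst h; exact pvSS.nil
  | cons x S' ih =>
    intro l h
    unfold pvChk at h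
    rcases hs : pvSplit x l with _ | ⟨u, v⟩ <;> rw [hs] at h
    · simp at h
    · simp only [Bool.and_eq_true, List.all_eq_true, decide_eq_true_eq] at h
      obtain ⟨⟨hu, hv⟩, hrec⟩ := h
      rw [pvSplit_eq hs]
      exact pvSS.cons x u v S' hu hv (ih _ hrec)

theorem pvStep_false (t : String) (acc : Option (Int × String)) (p : String × String)
    (h : PySem.Str.isIn p.1 t = false) : pvStep t acc p = acc := by
  unfold pvStep; rw [h]; rfl

theorem pvStep_true_none (t : String) (p : String × String)
    (h : PySem.Str.isIn p.1 t = true) :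
    pvStep t none p = some (PySem.Str.len p.1, p.2) := by
  unfold pvStep; rw [h]; rfl

theorem pvStep_true_lt (t : String) (p : String × String) (n : Int) (g : String)
    (h : PySem.Str.isIn p.1 t = true) (hlt : n < PySem.Str.len p.1) :
    pvStep t (some (n, g)) p = some (PySem.Str.len p.1, p.2) := by
  unfold pvStep
  rw [if_pos]
  rw [h]
  simp only [Bool.true_and]
  exact decide_eq_true hlt

theorem pvStep_ge (t : String) (p : String × String) (n : Int) (g : String)
    (hge : PySem.Str.len p.1 ≤ n) : pvStep t (some (n, g)) p = some (n, g) := by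
  unfold pvStep
  rw [if_neg]
  intro hc
  rw [Bool.and_eq_true] at hc
  exact absurd (of_decide_eq_true hc.2) (not_lt.mpr hge)

theorem pvFold_src {t : String} : ∀ (u : List (String × String)) (acc : Option (Int × String))
    (n : Int) (g : String), u.foldl (pvStep t) acc = some (n, g) →
    acc = some (n, g) ∨ ∃ p ∈ u, PySem.Str.isIn p.1 t = true ∧ n = PySem.Str.len p.1 := by
  intro u
  induction u with
  | nil => intro acc n g h; exact Or.inl h
  | cons p rest ih =>
    intro acc n g h
    rw [List.foldl_cons] at h
    rcases ih (pvStep t acc p) n g h with h1 | ⟨q, hq, hq2⟩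
    · rcases hin : PySem.Str.isIn p.1 t with _ | _
      · rw [pvStep_false t acc p hin] at h1; exact Or.inl h1
      · rcases acc with _ | ⟨m, gm⟩
        · rw [pvStep_true_none t p hin] at h1
          injection h1 with h1
          injection h1 with ha hb
          exact Or.inr ⟨p, by simp, hin, ha.symm⟩
        · by_cases hlt : m < PySem.Str.len p.1
          · rw [pvStep_true_lt t p m gm hin hlt] at h1
            injection h1 with h1
            injection h1 with ha hb
            exact Or.inr ⟨p, by simp, hin, ha.symm⟩
          · rw [pvStep_ge t p m gm (not_lt.mp hlt)] at h1
            exact Or.inl h1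
    · exact Or.inr ⟨q, List.mem_cons_of_mem _ hq, hq2⟩

theorem pvFold_keep {t : String} : ∀ (v : List (String × String)) (n : Int) (g : String),
    (∀ p ∈ v, PySem.Str.len p.1 ≤ n) → v.foldl (pvStep t) (some (n, g)) = some (n, g) := by
  intro v
  induction v with
  | nil => intro n g _; rfl
  | cons p rest ih =>
    intro n g hb
    rw [List.foldl_cons, pvStep_ge t p n g (hb p (by simp))]
    exact ih n g (fun q hq => hb q (List.mem_cons_of_mem _ hq))

theorem pvMain {l S : List (String × String)} (hss : pvSS l S) (t : String) :
    l.foldl (pvStep t) none =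
      (S.find? (fun p => PySem.Str.isIn p.1 t)).map (fun p => (PySem.Str.len p.1, p.2)) := by
  induction hss with
  | nil => rfl
  | cons x u v S' hu hv _ ih =>
    rw [List.foldl_append, List.foldl_cons]
    by_cases hx : PySem.Str.isIn x.1 t = true
    · have hstep : pvStep t (u.foldl (pvStep t) none) x = some (PySem.Str.len x.1, x.2) := by
        rcases hbu : u.foldl (pvStep t) none with _ | ⟨n, g⟩
        · exact pvStep_true_none t x hx
        · rcases pvFold_src u none n g hbu with h1 | ⟨p, hp, _, hn⟩
          · exact absurd h1 (by simp)
          · exact pvStep_true_lt t x n g hx (hn ▸ hu p hp)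
      rw [hstep, pvFold_keep v _ _ hv]
      simp only [List.find?_cons, hx, Option.map_some]
    · have hx' : PySem.Str.isIn x.1 t = false := Bool.not_eq_true _ ▸ hx
      rw [pvStep_false t _ x hx', ← List.foldl_append, ih]
      simp only [List.find?_cons, hx']

theorem pvLoop1_eq_find (t : String) : ∀ (S : List (String × String)),
    pvLoop1 S t = (S.find? (fun p => PySem.Str.isIn p.1 t)).map (·.2) := by
  intro S
  induction S with
  | nil => rfl
  | cons p rest ih =>
    rcases p with ⟨a, g⟩
    by_cases hp : PySem.Str.isIn a t = true
    · rw [pvLoop1, if_pos hp]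
      simp only [List.find?_cons, hp, Option.map_some]
    · rw [pvLoop1, if_neg hp, ih]
      have hp' : PySem.Str.isIn a t = false := Bool.not_eq_true _ ▸ hp
      simp only [List.find?_cons, hp']

set_option maxHeartbeats 2000000 in
theorem pvBody_eq (t : String) : pvMatchA t = pvMatchB t := by
  unfold pvMatchA pvMatchB
  have hs : PySem.List.sorted pvAliases.items (fun x => PySem.Str.len x.1) true = pvSLit := rfl
  have hss : pvSS pvAliases.items pvSLit := pvChk_sound _ _ rfl
  have hmain := pvMain hss t
  rcases hg : PySem.Dict.get? pvAliases t with _ | g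
  · rw [hs, pvLoop1_eq_find, hmain]
    rcases hf : pvSLit.find? (fun p => PySem.Str.isIn p.1 t) with _ | p <;> rw [hf]
    · -- no alias matched: the third loop also fails, both give "Standard"
      have hall := List.find?_eq_none.mp hf
      have h1 : ¬ PySem.Str.isIn "standard" t = true := by
        have := hall ("standard", "Standard") (by decide); simpa using this
      have h2 : ¬ PySem.Str.isIn "high purity" t = true := by
        have := hall ("high purity", "High Purity") (by decide); simpa using this
      have h3 : ¬ PySem.Str.isIn "food grade" t = true := by
        have := hall ("food grade", "Food Grade") (by decide); simpa using this
      have h4 : ¬ PySem.Str.isIn "nuclear grade" t = true := by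
        have := hall ("nuclear grade", "Nuclear Grade") (by decide); simpa using this
      have e1 : PySem.Str.lower "Standard" = "standard" := by decide
      have e2 : PySem.Str.lower "High Purity" = "high purity" := by decide
      have e3 : PySem.Str.lower "Food Grade" = "food grade" := by decide
      have e4 : PySem.Str.lower "Nuclear Grade" = "nuclear grade" := by decide
      simp only [Option.map_none]
      show pvLoop2 ["Standard", "High Purity", "Food Grade", "Nuclear Grade"] t = "Standard"
      rw [pvLoop2, e1, if_neg h1, pvLoop2, e2, if_neg h2, pvLoop2, e3, if_neg h3,
        pvLoop2, e4, if_neg h4, pvLoop2]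
    · rfl
  · -- direct match: t is one of the 28 literal keys; both sides compute
    have hmem : (t, g) ∈ pvAliases.items :=
      PySem.Dict.mem_items_of_get?_eq_some pvAliases hg
    rw [show pvAliases.items = [("standard", "Standard"), ("regular", "Standard"), ("normal", "Standard"), ("basic", "Standard"), ("general", "Standard"), ("high purity", "High Purity"), ("high-purity", "High Purity"), ("highpurity", "High Purity"), ("hp", "High Purity"), ("premium", "High Purity"), ("top notch", "High Purity"), ("top-notch", "High Purity"), ("topnotch", "High Purity"), ("superior", "High Purity"), ("ultra", "High Purity"), ("food grade", "Food Grade"), ("food-grade", "Food Grade"), ("foodgrade", "Food Grade"), ("fda", "Food Grade"), ("food safe", "Food Grade"), ("food", "Food Grade"), ("pharmaceutical", "Food Grade"), ("nuclear grade", "Nuclear Grade"), ("nuclear-grade", "Nuclear Grade"), ("nucleargrade", "Nuclear Grade"), ("nuclear", "Nuclear Grade"), ("reactor", "Nuclear Grade"), ("radiation", "Nuclear Grade")] from rfl] at hmem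
    simp only [List.mem_cons, List.not_mem_nil, or_false, Prod.mk.injEq] at hmem
    rcases hmem with ⟨rfl, rfl⟩ | ⟨rfl, rfl⟩ | ⟨rfl, rfl⟩ | ⟨rfl, rfl⟩ | ⟨rfl, rfl⟩ | ⟨rfl, rfl⟩ | ⟨rfl, rfl⟩ | ⟨rfl, rfl⟩ | ⟨rfl, rfl⟩ | ⟨rfl, rfl⟩ | ⟨rfl, rfl⟩ | ⟨rfl, rfl⟩ | ⟨rfl, rfl⟩ | ⟨rfl, rfl⟩ | ⟨rfl, rfl⟩ | ⟨rfl, rfl⟩ | ⟨rfl, rfl⟩ | ⟨rfl, rfl⟩ | ⟨rfl, rfl⟩ | ⟨rfl, rfl⟩ | ⟨rfl, rfl⟩ | ⟨rfl, rfl⟩ | ⟨rfl, rfl⟩ | ⟨rfl, rfl⟩ | ⟨rfl, rfl⟩ | ⟨rfl, rfl⟩ | ⟨rfl, rfl⟩ | ⟨rfl, rfl⟩ <;> rfl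

-- ===== VERDICT (by name: the statement is the Claim_ definition above) =====
set_option maxHeartbeats 2000000 in
theorem normalize_material_grade_spec : Claim_equal_normalize_material_grade := by
  intro gt _
  unfold Spec_normalize_material_grade normalize_material_grade normalize_material_grade_alt
  by_cases hgt : gt = ""
  · subst hgt
    exact (pvBody_eq "").symm ▸ rfl
  · rw [if_neg hgt]
    exact pvBody_eq _
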